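-- pv_equiv track=rewrite | github.com/kac20/NetVizResearch | graph-experiments/test-graph-files/generageGML.py | removeDegreeThresholdNodes
-- ===== SOURCE A (Python) =====
-- import copy
--
-- def removeDegreeThresholdNodes(edges, nodeDegreeThreshold, nodeDegrees):
--     edges_copy = copy.deepcopy(edges)
--     if nodeDegreeThreshold != None:
--         for node, degree in nodeDegrees.items():
--             if degree < nodeDegreeThreshold:
--                 # Remove node from the edges list
--                 for edge in edges.keys():
--                     if node in edge and edge in edges_copy:
--                         del edges_copy[edge]
--     return edges_copy
-- ===== SOURCE B (Python) =====
-- import copy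
--
-- def removeDegreeThresholdNodes(edges, nodeDegreeThreshold, nodeDegrees):
--     if nodeDegreeThreshold is None:
--         return copy.deepcopy(edges)
--     lowNodes = {node for node, degree in nodeDegrees.items()
--                 if degree < nodeDegreeThreshold}
--     return {copy.deepcopy(edge): copy.deepcopy(weight)
--             for edge, weight in edges.items()
--             if not any(n in edge for n in lowNodes)}
-- ===== Notes on version B (the rewrite author's own statement) =====
-- stated objective: simpler
-- what changed: A deep-copies the dict and, per low-degree node, rescans all edge keys deleting matches from the copy; B precomputes the set of low-degree nodes once and builds the result in a single filtering pass over the edges.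
import Mathlib
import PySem

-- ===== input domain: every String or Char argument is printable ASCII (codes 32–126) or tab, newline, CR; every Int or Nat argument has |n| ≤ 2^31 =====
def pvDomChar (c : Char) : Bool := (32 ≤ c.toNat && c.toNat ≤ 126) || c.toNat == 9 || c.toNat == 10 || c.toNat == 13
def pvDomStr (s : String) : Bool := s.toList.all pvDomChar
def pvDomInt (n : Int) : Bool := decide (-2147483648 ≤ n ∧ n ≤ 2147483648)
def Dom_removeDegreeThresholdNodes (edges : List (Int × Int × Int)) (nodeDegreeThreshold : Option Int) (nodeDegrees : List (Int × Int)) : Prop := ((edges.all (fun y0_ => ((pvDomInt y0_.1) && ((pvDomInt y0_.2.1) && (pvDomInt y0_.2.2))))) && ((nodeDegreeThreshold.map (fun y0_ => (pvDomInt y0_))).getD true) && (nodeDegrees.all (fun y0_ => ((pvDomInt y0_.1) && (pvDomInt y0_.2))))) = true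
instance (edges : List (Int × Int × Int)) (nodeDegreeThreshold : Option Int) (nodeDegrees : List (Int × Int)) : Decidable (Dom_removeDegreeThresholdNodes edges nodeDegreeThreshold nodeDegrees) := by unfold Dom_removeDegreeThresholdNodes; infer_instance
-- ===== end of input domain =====

-- B replaces A's per-low-node delete-from-a-deepcopy rescans by one precomputed
-- low-node set and a single filtering pass over the edges (objective: simpler).
-- Values are ints, so Python's deepcopy has no observable effect beyond the return value.

-- ===== PORT A =====
-- 'node in edge' on the key tuple (edge key = (e.1, e.2.1), value = e.2.2)
def pvTouch (n : Int) (e : Int × Int × Int) : Bool := n == e.1 || n == e.2.1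
-- key equality of two dict entries (same (a, b) key)
def pvKeyEq (x e : Int × Int × Int) : Bool := x.1 == e.1 && x.2.1 == e.2.1
-- one iteration of A's inner loop body: 'if node in edge and edge in edges_copy: del edges_copy[edge]'
def pvDelStep (n : Int) (ec : List (Int × Int × Int)) (e : Int × Int × Int) : List (Int × Int × Int) :=
  if pvTouch n e && ec.any (fun x => pvKeyEq x e) then ec.filter (fun x => !pvKeyEq x e) else ec

def removeDegreeThresholdNodes (edges : List (Int × Int × Int)) (nodeDegreeThreshold : Option Int) (nodeDegrees : List (Int × Int)) : List (Int × Int × Int) :=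
  let edges_copy := edges
  match nodeDegreeThreshold with
  | none => edges_copy
  | some t =>
    nodeDegrees.foldl (fun ec nd =>
      if nd.2 < t then edges.foldl (pvDelStep nd.1) ec else ec) edges_copy

-- ===== PORT B =====
def removeDegreeThresholdNodes_alt (edges : List (Int × Int × Int)) (nodeDegreeThreshold : Option Int) (nodeDegrees : List (Int × Int)) : List (Int × Int × Int) :=
  match nodeDegreeThreshold with
  | none => edges
  | some t =>
    let lowNodes : PySem.Set Int :=
      PySem.Set.ofList ((nodeDegrees.filter (fun nd => nd.2 < t)).map (fun nd => nd.1))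
    edges.filter (fun e => !(lowNodes.any (fun n => n == e.1 || n == e.2.1)))

-- ===== PRECONDITION & SPEC =====
def Spec_removeDegreeThresholdNodes (edges : List (Int × Int × Int)) (nodeDegreeThreshold : Option Int) (nodeDegrees : List (Int × Int)) (out : List (Int × Int × Int)) : Prop := out = removeDegreeThresholdNodes_alt edges nodeDegreeThreshold nodeDegrees
instance (edges : List (Int × Int × Int)) (nodeDegreeThreshold : Option Int) (nodeDegrees : List (Int × Int)) (out : List (Int × Int × Int)) : Decidable (Spec_removeDegreeThresholdNodes edges nodeDegreeThreshold nodeDegrees out) := by unfold Spec_removeDegreeThresholdNodes; infer_instance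

-- ===== CLAIM (what is proved, stated in full; the proofs are below) =====
def Claim_equal_removeDegreeThresholdNodes : Prop := ∀ (edges : List (Int × Int × Int)) (nodeDegreeThreshold : Option Int) (nodeDegrees : List (Int × Int)), Dom_removeDegreeThresholdNodes edges nodeDegreeThreshold nodeDegrees → Spec_removeDegreeThresholdNodes edges nodeDegreeThreshold nodeDegrees (removeDegreeThresholdNodes edges nodeDegreeThreshold nodeDegrees)

-- ===== LEMMAS AND PROOFS =====

-- keyEq entries are touched together
theorem pvTouch_of_keyEq {n : Int} {x e : Int × Int × Int} (hk : pvKeyEq x e = true) :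
    pvTouch n x = pvTouch n e := by
  simp only [pvKeyEq, Bool.and_eq_true, beq_iff_eq] at hk
  simp [pvTouch, hk.1, hk.2]

-- A's inner loop over the full edge list, on any accumulator:
theorem inner_loop_eq (n : Int) (es : List (Int × Int × Int)) :
    ∀ ec : List (Int × Int × Int),
      es.foldl (pvDelStep n) ec
        = ec.filter (fun x => !(pvTouch n x && es.any (fun e => pvKeyEq x e))) := by
  induction es with
  | nil => intro ec; simp
  | cons e es ih =>
    intro ec
    simp only [List.foldl_cons, ih, List.any_cons]
    by_cases ht : pvTouch n e = true
    · have hstep : pvDelStep n ec e = ec.filter (fun x => !pvKeyEq x e) := by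
        unfold pvDelStep
        by_cases hany : ec.any (fun x => pvKeyEq x e) = true
        · simp [ht, hany]
        · have hf : ec.any (fun x => pvKeyEq x e) = false := by
            cases hb : ec.any (fun x => pvKeyEq x e) with
            | false => rfl
            | true => exact absurd hb hany
          have : ec.filter (fun x => !pvKeyEq x e) = ec := by
            apply List.filter_eq_self.mpr
            intro x hx
            simpa using List.any_eq_false.mp hf x hx
          simp [ht, hany, this]
      rw [hstep, List.filter_filter]
      apply List.filter_congr
      intro x _
      by_cases hk : pvKeyEq x e = true
      · have := pvTouch_of_keyEq (n := n) hk
        simp [hk, this, ht]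
      · simp [hk]
    · have hstep : pvDelStep n ec e = ec := by
        unfold pvDelStep; simp [ht]
      rw [hstep]
      apply List.filter_congr
      intro x _
      by_cases hk : pvKeyEq x e = true
      · have := pvTouch_of_keyEq (n := n) hk
        simp [hk, this, ht]
      · simp [hk]
    
-- A's outer loop, starting from any filtered sublist of edges:
theorem outer_loop_eq (t : Int) (edges : List (Int × Int × Int)) :
    ∀ (deg : List (Int × Int)) (p : Int × Int × Int → Bool),
      deg.foldl (fun ec nd => if nd.2 < t then edges.foldl (pvDelStep nd.1) ec else ec)
          (edges.filter p)
        = edges.filter (fun x =>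
            p x && !(deg.any (fun nd => decide (nd.2 < t) && pvTouch nd.1 x))) := by
  intro deg
  induction deg with
  | nil => intro p; simp
  | cons nd ds ih =>
    intro p
    simp only [List.foldl_cons]
    by_cases h : nd.2 < t
    · rw [if_pos h, inner_loop_eq, List.filter_filter, ih]
      apply List.filter_congr
      intro x hx
      have hm : edges.any (fun e => pvKeyEq x e) = true :=
        List.any_eq_true.mpr ⟨x, hx, by simp [pvKeyEq]⟩
      cases p x <;> cases hpt : pvTouch nd.1 x <;> simp [hm, h, hpt]
    · rw [if_neg h, ih]
      apply List.filter_congr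
      intro x _
      simp [h]

-- membership-only 'any' is preserved by Python set construction
theorem any_ofList (l : List Int) (q : Int → Bool) :
    (PySem.Set.ofList l).any q = l.any q := by
  apply Bool.eq_iff_iff.mpr
  simp only [List.any_eq_true]
  constructor
  · rintro ⟨x, hx, hq⟩; exact ⟨x, (PySem.Set.mem_ofList l x).mp hx, hq⟩
  · rintro ⟨x, hx, hq⟩; exact ⟨x, (PySem.Set.mem_ofList l x).mpr hx, hq⟩

-- ===== VERDICT (by name: the statement is the Claim_ definition above) =====
theorem removeDegreeThresholdNodes_spec : Claim_equal_removeDegreeThresholdNodes := by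
  intro edges th deg _
  unfold Spec_removeDegreeThresholdNodes removeDegreeThresholdNodes removeDegreeThresholdNodes_alt
  match th with
  | none => rfl
  | some t =>
    simp only
    have h1 := outer_loop_eq t edges deg (fun _ => true)
    simp only [List.filter_true, Bool.true_and] at h1
    rw [h1]
    apply List.filter_congr
    intro e _
    rw [any_ofList]
    simp [List.any_filter, List.any_map, pvTouch, Function.comp, Bool.and_comm]
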